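-- pv_equiv track=rewrite | github.com/Picasso653/Cdewars- | python/7_kyu/perpendicular_lines.py | perpendicular
-- ===== SOURCE A (Python) =====
-- def perpendicular(n):
--     x = 0
--     d = 0
--     i = 0
--     if n < 2:
--         return 0
--     while i < n+1:
--         x += d
--         if i%2==1:
--             d +=1
--         i +=1
--     return x
-- ===== SOURCE B (Python) =====
-- def perpendicular(n):
--     # closed form: sum of floor(i/2) for i=0..n equals floor(n*n/4)
--     if n < 2:
--         return 0
--     return n * n // 4
-- ===== Notes on version B (the rewrite author's own statement) =====
-- stated objective: faster
-- what changed: Replaced the O(n) accumulation loop with the closed-form formula floor(n*n/4) for sum_{i<=n} floor(i/2).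
import Mathlib
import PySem

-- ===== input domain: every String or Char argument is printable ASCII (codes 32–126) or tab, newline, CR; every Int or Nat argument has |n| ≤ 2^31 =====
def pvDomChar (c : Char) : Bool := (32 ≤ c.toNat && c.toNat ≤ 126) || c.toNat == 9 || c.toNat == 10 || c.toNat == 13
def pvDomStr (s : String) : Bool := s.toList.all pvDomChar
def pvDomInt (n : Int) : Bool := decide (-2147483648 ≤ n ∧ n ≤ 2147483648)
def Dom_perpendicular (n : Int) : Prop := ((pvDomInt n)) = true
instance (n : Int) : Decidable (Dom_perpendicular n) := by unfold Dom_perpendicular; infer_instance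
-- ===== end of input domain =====

-- B replaces A's O(n) accumulation loop with the closed form floor(n*n/4) (faster: asymptotic).
-- ===== PORT A =====
-- while-loop of A: state (x, d, i); runs while i < n+1
def perpendicularLoop (n x d i : Int) : Int :=
  if _h : i < n + 1 then
    perpendicularLoop n (x + d) (if PySem.Int.mod i 2 == 1 then d + 1 else d) (i + 1)
  else x
termination_by (n + 1 - i).toNat
decreasing_by omega

def perpendicular (n : Int) : Int :=
  if n < 2 then 0 else perpendicularLoop n 0 0 0

-- ===== PORT B =====
def perpendicular_alt (n : Int) : Int :=
  if n < 2 then 0 else PySem.Int.floordiv (n * n) 4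

-- ===== PRECONDITION & SPEC =====
def Spec_perpendicular (n : Int) (out : Int) : Prop := out = perpendicular_alt n
instance (n : Int) (out : Int) : Decidable (Spec_perpendicular n out) := by unfold Spec_perpendicular; infer_instance

-- ===== CLAIM =====
def Claim_equal_perpendicular : Prop := ∀ (n : Int), Dom_perpendicular n → Spec_perpendicular n (perpendicular n)

-- ===== LEMMAS AND PROOFS =====
-- invariant: entering the loop at index i with d = i / 2, the loop adds n*n/4 - (i-1)^2/4 to x
theorem perpendicularLoop_inv (n : Int) : ∀ (k : Nat) (i x : Int), 0 ≤ i → i ≤ n + 1 →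
    (n + 1 - i).toNat = k →
    perpendicularLoop n x (i / 2) i = x + n * n / 4 - (i - 1) * (i - 1) / 4 := by
  intro k
  induction k with
  | zero =>
    intro i x h0 hle hk
    have hi : i = n + 1 := by omega
    subst hi
    rw [perpendicularLoop]
    simp only [show ¬ (n + 1 < n + 1) by omega, dite_eq_ite, if_false]
    have h1 : (n + 1 - 1) * (n + 1 - 1) = n * n := by ring
    rw [h1]; ring
  | succ k ih =>
    intro i x h0 hle hk
    have hlt : i < n + 1 := by omega
    rw [perpendicularLoop]
    simp only [hlt, dite_true]
    have hd : (if PySem.Int.mod i 2 == 1 then i / 2 + 1 else i / 2) = (i + 1) / 2 := by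
      rw [show PySem.Int.mod i 2 = i % 2 from PySem.Int.mod_eq_emod_of_pos (by omega)]
      rcases Int.even_or_odd i with ⟨m, hm⟩ | ⟨m, hm⟩ <;> subst hm <;> simp <;> omega
    rw [hd, ih (i + 1) (x + i / 2) (by omega) (by omega) (by omega)]
    -- arithmetic: i/2 - i*i/4 = -((i-1)*(i-1))/4
    rcases Int.even_or_odd i with ⟨m, hm⟩ | ⟨m, hm⟩ <;> subst hm
    · have e1 : (m + m + 1 - 1) * (m + m + 1 - 1) = 4 * (m * m) := by ring
      have e2 : (m + m - 1) * (m + m - 1) = 4 * (m * m) - 4 * m + 1 := by ring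
      rw [e1, e2]; omega
    · have e1 : (2 * m + 1 + 1 - 1) * (2 * m + 1 + 1 - 1) = 4 * (m * m) + 4 * m + 1 := by ring
      have e2 : (2 * m + 1 - 1) * (2 * m + 1 - 1) = 4 * (m * m) := by ring
      rw [e1, e2]; omega

theorem perpendicular_spec : Claim_equal_perpendicular := by
  intro n _
  unfold Spec_perpendicular perpendicular perpendicular_alt
  split_ifs with h
  · rfl
  · have h2 : (2:Int) ≤ n := by omega
    have := perpendicularLoop_inv n (n+1-0).toNat 0 0 (by omega) (by omega) rfl
    simp only [show (0:Int)/2 = 0 by decide] at this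
    rw [this, PySem.Int.floordiv_eq_ediv_of_pos (by omega)]
    norm_num
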